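-- pv_equiv track=rewrite | github.com/pypi-data/pypi-mirror-198 | packages/PythonFunctions/PythonFunctions-1.4.15.tar.gz/PythonFunctions-1.4.15/src/PythonFunctions/CleanFolderData.py | RemoveReserved
-- ===== SOURCE A (Python) =====
-- import typing
--
-- def RemoveReserved(
--     data: typing.List[str], reserved: typing.List[str]
-- ) -> typing.List[str]:
--     """Remove any files that are resereved for other purposes
--     Which the user didn't include, or are just generic system files.
--
--     Args:
--         data (typing.List[str]): The data for that path
--         reserved (typing.List[str]): The resereved file list
--
--     Returns:
--         typing.List[str]: The new list with the removed files
--     """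
--
--     # Convert to array if string
--     if isinstance(reserved, str):
--         reserved = [reserved]
--
--     # Checks if there are actually stuff to remove
--     if len(reserved) == 0:
--         return data
--
--     newData = []
--     for file in data:
--         # Reserved check
--         if file in reserved:
--             continue
--
--         # ends with reserved *
--         endswithForbidden = False
--         for item in reserved:
--             if item.startswith("*"):
--                 if file.endswith(item[1:]):
--                     endswithForbidden = True
--
--         if endswithForbidden:
--             continue
--
--         newData.append(file)
--     return newData
-- ===== SOURCE B (Python) =====
-- def RemoveReserved(data, reserved):
--     if isinstance(reserved, str):
--         reserved = [reserved]
--     # Sieve over the reserved list: each reserved item filters the surviving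
--     # data in its own pass (wildcard items remove by suffix, which subsumes
--     # the literal "*suffix" name itself; plain items remove by equality).
--     for item in reserved:
--         if item.startswith("*"):
--             suffix = item[1:]
--             data = [f for f in data if not f.endswith(suffix)]
--         else:
--             data = [f for f in data if f != item]
--     return data
-- ===== Notes on version B (the rewrite author's own statement) =====
-- stated objective: alternative
-- what changed: B inverts the loop nesting into a sieve: it iterates over the reserved list and each reserved item filters the surviving data in its own pass (wildcard items by suffix, which subsumes the literal '*suffix' name; plain items by equality), instead of A's single pass over data with per-file scans of reserved.
import Mathlib
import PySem

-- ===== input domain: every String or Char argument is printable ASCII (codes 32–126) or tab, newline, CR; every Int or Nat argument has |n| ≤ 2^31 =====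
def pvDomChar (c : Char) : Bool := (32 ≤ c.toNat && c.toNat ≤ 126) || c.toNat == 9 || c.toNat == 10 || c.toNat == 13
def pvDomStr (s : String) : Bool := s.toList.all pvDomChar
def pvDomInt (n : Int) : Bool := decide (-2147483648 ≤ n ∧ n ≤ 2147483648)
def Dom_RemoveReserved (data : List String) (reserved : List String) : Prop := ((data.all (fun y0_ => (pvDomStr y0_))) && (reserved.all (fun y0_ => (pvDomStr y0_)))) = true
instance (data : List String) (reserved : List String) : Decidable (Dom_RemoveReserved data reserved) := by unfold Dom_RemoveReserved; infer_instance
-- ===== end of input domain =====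

-- B inverts the loop nesting into a sieve over the reserved list — each reserved item
-- filters the surviving data in its own pass (objective: alternative; same cost).


-- ===== PORT A =====
def RemoveReserved (data : List String) (reserved : List String) : List String :=
  if reserved.length = 0 then data
  else
    data.foldl (fun newData file =>
      if reserved.contains file then newData
      else
        let endswithForbidden := reserved.foldl (fun b item =>
          if PySem.Str.startswith item "*" then
            if PySem.Str.endswith file (PySem.Str.slice item (some 1) none) then true else b
          else b) false
        if endswithForbidden then newData else newData ++ [file]) []

-- ===== PORT B =====
def RemoveReserved_alt (data : List String) (reserved : List String) : List String :=
  reserved.foldl (fun d item =>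
    if PySem.Str.startswith item "*" then
      let suffix := PySem.Str.slice item (some 1) none
      d.filter (fun f => !PySem.Str.endswith f suffix)
    else
      d.filter (fun f => f != item)) data

-- ===== PRECONDITION & SPEC =====
def Spec_RemoveReserved (data : List String) (reserved : List String) (out : List String) : Prop := out = RemoveReserved_alt data reserved
instance (data : List String) (reserved : List String) (out : List String) : Decidable (Spec_RemoveReserved data reserved out) := by unfold Spec_RemoveReserved; infer_instance

-- ===== CLAIM =====
def Claim_equal_RemoveReserved : Prop := ∀ (data : List String) (reserved : List String), Dom_RemoveReserved data reserved → Spec_RemoveReserved data reserved (RemoveReserved data reserved)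

-- ===== LEMMAS AND PROOFS =====

-- Per-item kill predicate: what one reserved item removes in B's sieve.
def pvKill (item f : String) : Bool :=
  if PySem.Str.startswith item "*" then
    PySem.Str.endswith f (PySem.Str.slice item (some 1) none)
  else f == item

-- A's inner wildcard loop computes an 'any' over the reserved list.
theorem inner_fold_eq_any (file : String) (reserved : List String) (b : Bool) :
    reserved.foldl (fun b item =>
      if PySem.Str.startswith item "*" then
        if PySem.Str.endswith file (PySem.Str.slice item (some 1) none) then true else b
      else b) b
    = (b || reserved.any (fun item =>
        PySem.Str.startswith item "*" &&
        PySem.Str.endswith file (PySem.Str.slice item (some 1) none))) := by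
  have aux : ∀ (sw ew b r : Bool),
      ((if sw then (if ew then true else b) else b) || r) = (b || (sw && ew || r)) := by decide
  induction reserved generalizing b with
  | nil => simp
  | cons x xs ih =>
      simp only [List.foldl_cons, List.any_cons, ih, aux]

-- A's outer accumulator loop is a filter by the keep-predicate.
theorem outer_fold_eq_filter (p : String → Bool) (data acc : List String) :
    data.foldl (fun newData file => if p file then newData ++ [file] else newData) acc
    = acc ++ data.filter p := by
  induction data generalizing acc with
  | nil => simp
  | cons x xs ih =>
      by_cases h : p x = true <;> simp [h, ih]

-- B's sieve over reserved is a single filter by "no item kills f".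
theorem sieve_eq_filter (reserved data : List String) :
    reserved.foldl (fun d item => d.filter (fun f => !pvKill item f)) data
    = data.filter (fun f => !(reserved.any (fun item => pvKill item f))) := by
  induction reserved generalizing data with
  | nil => simp
  | cons x xs ih =>
      simp only [List.foldl_cons, ih, List.filter_filter, List.any_cons]
      apply List.filter_congr
      intro f _
      cases pvKill x f <;> simp

-- A wildcard item literally named "*suffix" itself ends with suffix, so for a
-- wildcard item, equality is subsumed by the suffix test.
theorem eq_subsumed (f item : String) (h : PySem.Str.startswith item "*" = true) :
    ((f == item) || PySem.Str.endswith f (PySem.Str.slice item (some 1) none))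
      = PySem.Str.endswith f (PySem.Str.slice item (some 1) none) := by
  cases he : (f == item) with
  | false => simp
  | true =>
      have hf : f = item := eq_of_beq he
      subst hf
      simp only [Bool.true_or]
      have h1 : ("*" : String).toList <+: f.toList := by
        have := (PySem.Chars.startswith_iff (s := f.toList) (p := ("*" : String).toList)).mp
        simp only [PySem.Str.startswith_eq] at h
        exact this h
      obtain ⟨t, ht⟩ := h1
      have hstar : ("*" : String).toList = ['*'] := by decide
      rw [hstar] at ht
      symm
      rw [PySem.Str.endswith_eq]
      rw [PySem.Chars.endswith_iff]
      have hsl : (PySem.Str.slice f (some 1) none).toList = f.toList.tail := by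
        simp [PySem.Str.toList_slice, PySem.Chars.slice_eq_listSlice,
          PySem.List.slice_from_one]
      rw [hsl, ← ht]
      exact ⟨['*'], rfl⟩

-- "f is removed by A" and "some item kills f in B" are the same Boolean.
theorem any_kill_split (f : String) (reserved : List String) :
    (reserved.contains f ||
      reserved.any (fun item =>
        PySem.Str.startswith item "*" &&
        PySem.Str.endswith f (PySem.Str.slice item (some 1) none)))
    = reserved.any (fun item => pvKill item f) := by
  induction reserved with
  | nil => simp
  | cons x xs ih =>
      simp only [List.contains_cons, List.any_cons]
      rw [← ih]
      unfold pvKill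
      cases hsw : PySem.Str.startswith x "*" with
      | false =>
          simp only [hsw, Bool.false_and, Bool.false_or, Bool.false_eq_true, if_false]
          cases (f == x) <;> cases xs.contains f <;>
            cases xs.any (fun item =>
              PySem.Str.startswith item "*" &&
              PySem.Str.endswith f (PySem.Str.slice item (some 1) none)) <;> simp
      | true =>
          simp only [hsw, Bool.true_and, if_pos rfl]
          have hsub := eq_subsumed f x hsw
          cases hew : PySem.Str.endswith f (PySem.Str.slice x (some 1) none) with
          | true => simp [hew]
          | false =>
              rw [hew] at hsub
              simp only [Bool.or_false] at hsub
              simp [hew, hsub]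

theorem RemoveReserved_eq_alt (data reserved : List String) :
    RemoveReserved data reserved = RemoveReserved_alt data reserved := by
  have hB : RemoveReserved_alt data reserved
      = data.filter (fun f => !(reserved.any (fun item => pvKill item f))) := by
    unfold RemoveReserved_alt
    have hstep : (fun (d : List String) (item : String) =>
        if PySem.Str.startswith item "*" then
          let suffix := PySem.Str.slice item (some 1) none
          d.filter (fun f => !PySem.Str.endswith f suffix)
        else
          d.filter (fun f => f != item))
      = (fun (d : List String) (item : String) => d.filter (fun f => !pvKill item f)) := by
      funext d item
      unfold pvKill
      cases h : PySem.Str.startswith item "*" <;> simp [h, bne]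
    rw [hstep, sieve_eq_filter]
  rw [hB]
  unfold RemoveReserved
  by_cases hres : reserved.length = 0
  · rcases List.length_eq_zero_iff.mp hres with rfl
    simp
  · simp only [hres, if_false]
    have hbody : (fun (newData : List String) (file : String) =>
        if reserved.contains file then newData
        else
          let endswithForbidden := reserved.foldl (fun b item =>
            if PySem.Str.startswith item "*" then
              if PySem.Str.endswith file (PySem.Str.slice item (some 1) none) then true else b
            else b) false
          if endswithForbidden then newData else newData ++ [file])
      = (fun (newData : List String) (file : String) =>
        if (!(reserved.any (fun item => pvKill item file)))
        then newData ++ [file] else newData) := by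
      funext newData file
      simp only [inner_fold_eq_any, Bool.false_or, ← any_kill_split]
      cases h1 : reserved.contains file <;>
        cases h2 : reserved.any (fun item =>
          PySem.Str.startswith item "*" &&
          PySem.Str.endswith file (PySem.Str.slice item (some 1) none)) <;>
        simp [h1, h2]
    rw [hbody, outer_fold_eq_filter]
    simp

-- ===== VERDICT =====
theorem RemoveReserved_spec : Claim_equal_RemoveReserved := by
  intro data reserved _
  exact RemoveReserved_eq_alt data reserved
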